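-- pv_equiv track=rewrite | github.com/mraesthetic/math-bop | old/games/1_0_gunslingers/rebalance_fr0.py | find_low_clusters
-- ===== SOURCE A (Python) =====
-- from collections import Counter, defaultdict
--
-- def find_low_clusters(reels):
--     """Find positions of low symbol clusters (3+ consecutive lows) in each reel."""
--     clusters = defaultdict(list)  # {reel_idx: [(start_pos, length), ...]}
--
--     for reel_idx, reel in enumerate(reels):
--         consecutive_lows = 0
--         start_pos = None
--
--         for pos, symbol in enumerate(reel):
--             if symbol.startswith('L'):
--                 if consecutive_lows == 0:
--                     start_pos = pos
--                 consecutive_lows += 1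
--             else:
--                 if consecutive_lows >= 3:
--                     clusters[reel_idx].append((start_pos, consecutive_lows))
--                 consecutive_lows = 0
--                 start_pos = None
--
--         # Check if reel ends with a cluster
--         if consecutive_lows >= 3:
--             clusters[reel_idx].append((start_pos, consecutive_lows))
--
--     return clusters
-- ===== SOURCE B (Python) =====
-- def _runs(pos, reel):
--     """Runs of 3+ consecutive low symbols in reel, positions offset by pos."""
--     if not reel:
--         return []
--     if reel[0].startswith('L'):
--         k = 1
--         while k < len(reel) and reel[k].startswith('L'):
--             k += 1
--         rest = _runs(pos + k, reel[k:])
--         return [(pos, k)] + rest if k >= 3 else rest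
--     return _runs(pos + 1, reel[1:])
--
--
-- def find_low_clusters(reels):
--     """Find positions of low symbol clusters (3+ consecutive lows) in each reel."""
--     clusters = {}
--     for idx, reel in enumerate(reels):
--         runs = _runs(0, reel)
--         if runs:
--             clusters[idx] = runs
--     return clusters
-- ===== Notes on version B (the rewrite author's own statement) =====
-- stated objective: alternative
-- what changed: Replaces A's per-symbol counter/start-position state machine flushing into a defaultdict by a recursive run-jumping scan (each maximal low run found at once, recursing on the sliced remainder) whose whole per-reel run list is installed into a plain dict in one assignment.
import Mathlib
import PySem

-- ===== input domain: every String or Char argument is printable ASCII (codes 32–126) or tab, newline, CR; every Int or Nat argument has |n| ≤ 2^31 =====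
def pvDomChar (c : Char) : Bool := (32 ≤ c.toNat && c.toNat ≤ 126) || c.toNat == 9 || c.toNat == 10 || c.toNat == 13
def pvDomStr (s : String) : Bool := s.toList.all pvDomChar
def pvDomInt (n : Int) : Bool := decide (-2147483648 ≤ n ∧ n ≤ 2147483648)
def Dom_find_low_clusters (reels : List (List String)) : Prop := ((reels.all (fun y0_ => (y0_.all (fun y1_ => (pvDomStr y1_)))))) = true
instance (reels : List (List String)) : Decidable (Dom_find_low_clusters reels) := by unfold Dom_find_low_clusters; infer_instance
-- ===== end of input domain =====

-- B replaces A's per-symbol counter state machine feeding a defaultdict by a run-jumping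
-- recursive scan whose whole per-reel run list is installed into a plain dict at once
-- (alternative decomposition; same linear cost).


-- ===== PORT A =====
-- inner 'for pos, symbol in enumerate(reel)' loop of A, threading the state
-- (pos, consecutive_lows, start_pos, clusters-dict); the final [] case is the
-- trailing 'if consecutive_lows >= 3' check. start_pos is Option Int (None ↔ none);
-- '.getD 0' is only evaluated when cons ≥ 3, where start_pos is always some.
def aReel (idx : Int) (pos cons : Int) (start : Option Int)
    (d : PySem.Dict Int (List (Int × Int))) : List String → PySem.Dict Int (List (Int × Int))
  | [] => if 3 ≤ cons then d.insert idx (d.getD idx [] ++ [(start.getD 0, cons)]) else d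
  | s :: rest =>
    if PySem.Str.startswith s "L" then
      aReel idx (pos + 1) (cons + 1) (if cons = 0 then some pos else start) d rest
    else
      aReel idx (pos + 1) 0 none
        (if 3 ≤ cons then d.insert idx (d.getD idx [] ++ [(start.getD 0, cons)]) else d) rest

def find_low_clusters (reels : List (List String)) : List (Int × List (Int × Int)) :=
  ((PySem.List.enumerate reels 0).foldl
    (fun d p => aReel p.1 0 0 none d p.2) PySem.Dict.empty).items

-- ===== PORT B =====
-- Source B's _runs: run-jumping scan; the inner while loop computing k is
-- 1 + takeWhile-length, and reel[k:] is the matching dropWhile.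
def altRuns (pos : Int) : List String → List (Int × Int)
  | [] => []
  | s :: rest =>
    if PySem.Str.startswith s "L" then
      let k : Nat := 1 + (rest.takeWhile (fun t => PySem.Str.startswith t "L")).length
      let rst := altRuns (pos + (k : Int)) (rest.dropWhile (fun t => PySem.Str.startswith t "L"))
      if 3 ≤ k then (pos, (k : Int)) :: rst else rst
    else altRuns (pos + 1) rest
  termination_by l => l.length
  decreasing_by
  · simpa using Nat.lt_succ_of_le (List.length_dropWhile_le _ _)
  · simp

def find_low_clusters_alt (reels : List (List String)) : List (Int × List (Int × Int)) :=
  (PySem.List.enumerate reels 0).foldl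
    (fun acc p => let rs := altRuns 0 p.2; if rs.isEmpty then acc else acc ++ [(p.1, rs)]) []

-- ===== PRECONDITION & SPEC =====
def Spec_find_low_clusters (reels : List (List String)) (out : List (Int × List (Int × Int))) : Prop := out = find_low_clusters_alt reels
instance (reels : List (List String)) (out : List (Int × List (Int × Int))) : Decidable (Spec_find_low_clusters reels out) := by unfold Spec_find_low_clusters; infer_instance

-- ===== CLAIM (what is proved, stated in full; the proofs are below) =====
def Claim_equal_find_low_clusters : Prop := ∀ (reels : List (List String)), Dom_find_low_clusters reels → Spec_find_low_clusters reels (find_low_clusters reels)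

-- ===== LEMMAS AND PROOFS =====

-- repeated clusters[idx].append(r) for r in rs
def appendRun (d : PySem.Dict Int (List (Int × Int))) (idx : Int) (rs : List (Int × Int)) :
    PySem.Dict Int (List (Int × Int)) :=
  rs.foldl (fun d r => d.insert idx (d.getD idx [] ++ [r])) d

lemma appendRun_insert (idx : Int) :
    ∀ (rs : List (Int × Int)) (d : PySem.Dict Int (List (Int × Int))) (v : List (Int × Int)),
      appendRun (d.insert idx v) idx rs = d.insert idx (v ++ rs) := by
  intro rs
  induction rs with
  | nil => intro d v; simp [appendRun]
  | cons r rs ih =>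
    intro d v
    simp only [appendRun, List.foldl_cons, PySem.Dict.getD_insert_self,
      PySem.Dict.insert_insert_self]
    have := ih d (v ++ [r])
    simpa [appendRun, List.append_assoc] using this

lemma aReel_lows (idx : Int) :
    ∀ (l : List String), (∀ s ∈ l, PySem.Str.startswith s "L" = true) →
      ∀ (pos k : Int) (p : Int) (d : PySem.Dict Int (List (Int × Int))) (rest : List String),
        1 ≤ k →
        aReel idx pos k (some p) d (l ++ rest)
          = aReel idx (pos + l.length) (k + l.length) (some p) d rest := by
  intro l
  induction l with
  | nil => intro _ pos k p d rest _; simp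
  | cons s l ih =>
    intro hall pos k p d rest hk
    have hs : PySem.Str.startswith s "L" = true := hall s (by simp)
    have hk0 : ¬ k = 0 := by omega
    simp only [List.cons_append, aReel, hs, if_true, hk0, if_false]
    rw [ih (fun t ht => hall t (by simp [ht])) (pos + 1) (k + 1) p d rest (by omega)]
    congr 1 <;> (simp only [List.length_cons]; push_cast; ring)

lemma dropWhile_head_false {p : String → Bool} {l : List String} {s : String} {r : List String}
    (h : l.dropWhile p = s :: r) : p s = false := by
  have := List.head?_dropWhile_not p l
  rw [h] at this
  simpa using this

lemma aReel_eq (idx : Int) :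
    ∀ (n : Nat) (reel : List String), reel.length ≤ n →
      ∀ (pos : Int) (d : PySem.Dict Int (List (Int × Int))),
        aReel idx pos 0 none d reel = appendRun d idx (altRuns pos reel) := by
  intro n
  induction n with
  | zero =>
    intro reel hlen pos d
    have : reel = [] := List.eq_nil_of_length_eq_zero (by omega)
    subst this; simp [aReel, altRuns, appendRun]
  | succ n ih =>
    intro reel hlen pos d
    cases reel with
    | nil => simp [aReel, altRuns, appendRun]
    | cons s rest =>
      by_cases hs : PySem.Str.startswith s "L" = true
      · -- head is low: A walks through the whole maximal run
        have hsplit : rest = rest.takeWhile (fun t => PySem.Str.startswith t "L")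
            ++ rest.dropWhile (fun t => PySem.Str.startswith t "L") :=
          (List.takeWhile_append_dropWhile).symm
        set tk := rest.takeWhile (fun t => PySem.Str.startswith t "L") with htk
        set dp := rest.dropWhile (fun t => PySem.Str.startswith t "L") with hdp
        have hall : ∀ t ∈ tk, PySem.Str.startswith t "L" = true := by
          intro t ht
          rw [htk] at ht
          exact List.mem_takeWhile_imp (p := fun u => PySem.Str.startswith u "L") ht
        have h1 : aReel idx pos 0 none d (s :: rest)
            = aReel idx (pos + 1 + tk.length) (1 + tk.length) (some pos) d dp := by
          simp only [aReel, hs, if_true]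
          rw [show rest = tk ++ dp from hsplit]
          exact aReel_lows idx tk hall (pos + 1) 1 pos d dp (by omega)
        have hcast : ((1 + tk.length : Nat) : Int) = 1 + (tk.length : Int) := by
          push_cast; ring
        have haltB : altRuns pos (s :: rest)
            = (if 3 ≤ 1 + tk.length then
                 [(pos, (1 + (tk.length : Int)))] else [])
              ++ altRuns (pos + (1 + (tk.length : Int))) dp := by
          rw [altRuns]
          simp only [hs, if_true, ← htk, ← hdp, hcast]
          split <;> simp
        cases hdpc : dp with
        | nil =>
          -- the reel ends inside the run: trailing check fires
          rw [h1, hdpc, haltB, hdpc]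
          simp only [aReel, altRuns, List.append_nil]
          by_cases h3 : 3 ≤ 1 + tk.length
          · have h3' : (3 : Int) ≤ 1 + (tk.length : Int) := by omega
            rw [if_pos h3, if_pos h3']
            simp [appendRun]
          · have h3' : ¬ (3 : Int) ≤ 1 + (tk.length : Int) := by omega
            rw [if_neg h3, if_neg h3']
            simp [appendRun]
        | cons s' r' =>
          have hs' : PySem.Str.startswith s' "L" = false :=
            dropWhile_head_false (p := fun t => PySem.Str.startswith t "L") (hdp ▸ hdpc)
          have hr'len : r'.length ≤ n := by
            have h2 : dp.length ≤ rest.length := by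
              rw [hdp]; exact List.length_dropWhile_le _ _
            rw [hdpc] at h2
            simp at hlen h2; omega
          rw [h1, hdpc]
          simp only [aReel, hs', Bool.false_eq_true, if_false]
          rw [ih r' hr'len (pos + 1 + tk.length + 1)
            (if (3 : Int) ≤ 1 + tk.length then
               d.insert idx (d.getD idx [] ++ [((some pos).getD 0, (1 + tk.length : Int))]) else d)]
          rw [haltB, hdpc]
          rw [altRuns]
          simp only [hs', Bool.false_eq_true, if_false]
          rw [show pos + (1 + (tk.length : Int)) + 1 = pos + 1 + tk.length + 1 by ring]
          by_cases h3 : 3 ≤ 1 + tk.length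
          · have h3' : (3 : Int) ≤ 1 + (tk.length : Int) := by omega
            rw [if_pos h3, if_pos h3']
            simp [appendRun]
          · have h3' : ¬ (3 : Int) ≤ 1 + (tk.length : Int) := by omega
            rw [if_neg h3, if_neg h3']
            simp
      · -- head is not low with cons = 0: both just move on
        have hr : rest.length ≤ n := by simp at hlen; omega
        rw [altRuns]
        simp only [aReel, hs, Bool.false_eq_true, if_false]
        exact ih rest hr (pos + 1) d

lemma getD_of_not_mem_keys (d : PySem.Dict Int (List (Int × Int))) (k : Int)
    (h : k ∉ d.keys) : d.getD k [] = [] := by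
  have hn : d.get? k = none := (PySem.Dict.get?_eq_none_iff_not_mem_keys d k).mpr h
  simp [PySem.Dict.getD, hn]

lemma appendRun_fresh (d : PySem.Dict Int (List (Int × Int))) (idx : Int)
    (h : idx ∉ d.keys) :
    ∀ rs, (appendRun d idx rs).items
      = if rs.isEmpty then d.items else d.items ++ [(idx, rs)] := by
  intro rs
  cases rs with
  | nil => simp [appendRun]
  | cons r rs =>
    have hc : d.contains idx = false := by
      cases hcc : d.contains idx with
      | false => rfl
      | true => exact absurd ((PySem.Dict.contains_iff_mem_keys d idx).mp hcc) h
    have h0 : d.getD idx [] = [] := getD_of_not_mem_keys d idx h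
    simp only [appendRun, List.foldl_cons]
    have := appendRun_insert idx rs d (d.getD idx [] ++ [r])
    simp only [appendRun] at this
    rw [this, h0]
    rw [PySem.Dict.items_insert_of_not_contains _ _ hc]
    simp

lemma keys_appendRun_subset (d : PySem.Dict Int (List (Int × Int))) (idx : Int)
    (rs : List (Int × Int)) (k : Int) (hk : k ∈ (appendRun d idx rs).keys) :
    k ∈ d.keys ∨ k = idx := by
  induction rs generalizing d with
  | nil => exact Or.inl (by simpa [appendRun] using hk)
  | cons r rs ih =>
    simp only [appendRun, List.foldl_cons] at hk
    rcases ih (d.insert idx (d.getD idx [] ++ [r])) (by simpa [appendRun] using hk) with h | h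
    · rcases (PySem.Dict.mem_keys_insert _ _ _ _).mp h with h | h
      · exact Or.inr h
      · exact Or.inl h
    · exact Or.inr h

lemma outer_eq :
    ∀ (reels : List (List String)) (s : Int) (d : PySem.Dict Int (List (Int × Int))),
      (∀ k ∈ d.keys, k < s) →
      ((PySem.List.enumerate reels s).foldl (fun d p => aReel p.1 0 0 none d p.2) d).items
        = (PySem.List.enumerate reels s).foldl
            (fun acc p => let rs := altRuns 0 p.2; if rs.isEmpty then acc else acc ++ [(p.1, rs)])
            d.items := by
  intro reels
  induction reels with
  | nil => intro s d _; simp [PySem.List.enumerate_nil]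
  | cons reel reels ih =>
    intro s d hkeys
    rw [PySem.List.enumerate_cons]
    simp only [List.foldl_cons]
    have hfresh : s ∉ d.keys := fun h => lt_irrefl s (hkeys s h)
    have hstep : aReel s 0 0 none d reel = appendRun d s (altRuns 0 reel) :=
      aReel_eq s reel.length reel le_rfl 0 d
    rw [hstep]
    rw [ih (s + 1) (appendRun d s (altRuns 0 reel))
      (by
        intro k hk
        rcases keys_appendRun_subset d s _ k hk with h | h
        · exact lt_trans (hkeys k h) (by omega)
        · omega)]
    rw [appendRun_fresh d s hfresh (altRuns 0 reel)]

-- ===== VERDICT (by name: the statement is the Claim_ definition above) =====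
theorem find_low_clusters_spec : Claim_equal_find_low_clusters := by
  intro reels _
  unfold Spec_find_low_clusters find_low_clusters find_low_clusters_alt
  rw [outer_eq reels 0 PySem.Dict.empty (by simp [PySem.Dict.keys_empty])]
  rfl
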